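-- pv_equiv track=rewrite | github.com/vlad131293/hse_python | Task_1_md_converter/md_converter.py | prepare_md_titles
-- ===== SOURCE A (Python) =====
-- def prepare_md_titles(data):
--     title = description = None
--
--     for line in data.split('\n'):
--         if line.startswith('# title'):
--             title = line.replace('# title ', '')
--         elif line.startswith('# description'):
--             description = line.replace('# description ', '')
--
--     return title, description
-- ===== SOURCE B (Python) =====
-- def prepare_md_titles(data):
--     title = description = None
--     for line in reversed(data.split('\n')):
--         if title is not None and description is not None:
--             break  # both found: the remaining (earlier) lines cannot matter
--         if title is None and line.startswith('# title'):
--             title = line.replace('# title ', '')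
--         elif description is None and line.startswith('# description'):
--             description = line.replace('# description ', '')
--     return title, description
-- ===== Notes on version B (the rewrite author's own statement) =====
-- stated objective: alternative
-- what changed: A folds forward over all lines letting later matches overwrite earlier ones; B scans the lines in reverse keeping the first match of each kind and breaks out as soon as both title and description are found.
import Mathlib
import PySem

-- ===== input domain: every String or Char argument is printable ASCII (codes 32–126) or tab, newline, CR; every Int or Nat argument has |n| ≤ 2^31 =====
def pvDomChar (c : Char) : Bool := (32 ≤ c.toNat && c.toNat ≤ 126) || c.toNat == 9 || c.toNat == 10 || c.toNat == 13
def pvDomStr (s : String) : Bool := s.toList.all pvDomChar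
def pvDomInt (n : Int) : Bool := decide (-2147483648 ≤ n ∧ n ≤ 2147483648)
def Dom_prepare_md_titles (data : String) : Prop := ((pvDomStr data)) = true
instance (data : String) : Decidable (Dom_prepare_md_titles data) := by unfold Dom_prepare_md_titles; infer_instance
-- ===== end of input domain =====

-- ===== PORT A =====
-- A: one forward pass over the lines; later matches overwrite earlier ones (last occurrence wins).
def prepare_md_titles (data : String) : Option String × Option String :=
  ((PySem.Str.split? data "\n").getD []).foldl
    (fun (st : Option String × Option String) line =>
      if PySem.Str.startswith line "# title" then
        (some (PySem.Str.replace line "# title " ""), st.2)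
      else if PySem.Str.startswith line "# description" then
        (st.1, some (PySem.Str.replace line "# description " ""))
      else st)
    (none, none)

-- ===== PORT B =====
-- B: scan the lines in reverse, take the FIRST match of each kind, stop once both are found.
def pvScanRev : List String → Option String → Option String → Option String × Option String
  | [], title, description => (title, description)
  | line :: rest, title, description =>
    if title.isSome && description.isSome then (title, description)
    else
      pvScanRev rest
        (if title.isNone && PySem.Str.startswith line "# title" then
           some (PySem.Str.replace line "# title " "")
         else title)
        (if !(title.isNone && PySem.Str.startswith line "# title") &&
            description.isNone && PySem.Str.startswith line "# description" then
           some (PySem.Str.replace line "# description " "")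
         else description)

def prepare_md_titles_alt (data : String) : Option String × Option String :=
  pvScanRev ((PySem.Str.split? data "\n").getD []).reverse none none

-- ===== PRECONDITION & SPEC =====
def Spec_prepare_md_titles (data : String) (out : Option String × Option String) : Prop := out = prepare_md_titles_alt data
instance (data : String) (out : Option String × Option String) : Decidable (Spec_prepare_md_titles data out) := by unfold Spec_prepare_md_titles; infer_instance

-- ===== CLAIM (what is proved, stated in full; the proofs are below) =====
def Claim_equal_prepare_md_titles : Prop := ∀ (data : String), Dom_prepare_md_titles data → Spec_prepare_md_titles data (prepare_md_titles data)

-- ===== LEMMAS AND PROOFS =====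

lemma pvScanRev_done (L : List String) (a b : String) :
    pvScanRev L (some a) (some b) = (some a, some b) := by
  cases L <;> simp [pvScanRev]

lemma pvScanRev_append (M N : List String) (t d : Option String) :
    pvScanRev (M ++ N) t d = pvScanRev N (pvScanRev M t d).1 (pvScanRev M t d).2 := by
  induction M generalizing t d with
  | nil => simp [pvScanRev]
  | cons x M ih =>
    simp only [List.cons_append, pvScanRev]
    by_cases hb : (t.isSome && d.isSome) = true
    · obtain ⟨⟨a, ha⟩, ⟨b, hb'⟩⟩ :=
        And.intro (Option.isSome_iff_exists.mp (Bool.and_eq_true _ _ ▸ hb).1)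
                  (Option.isSome_iff_exists.mp (Bool.and_eq_true _ _ ▸ hb).2)
      subst ha hb'
      simp [pvScanRev_done]
    · simp only [hb, if_false, Bool.false_eq_true]
      exact ih _ _

lemma not_title_and_desc (line : String) (h : PySem.Str.startswith line "# title" = true) :
    PySem.Str.startswith line "# description" = false := by
  rw [PySem.Str.startswith_eq] at h ⊢
  rw [PySem.Chars.startswith_iff] at h
  obtain ⟨u, hu⟩ := h
  rw [show ("# title".toList) = ['#', ' ', 't', 'i', 't', 'l', 'e'] from rfl] at hu
  rw [← hu]
  simp [PySem.Chars.startswith, List.isPrefixOf]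

-- abbreviation used only by the proofs: A's loop step
def pvStepA (st : Option String × Option String) (line : String) :
    Option String × Option String :=
  if PySem.Str.startswith line "# title" then
    (some (PySem.Str.replace line "# title " ""), st.2)
  else if PySem.Str.startswith line "# description" then
    (st.1, some (PySem.Str.replace line "# description " ""))
  else st

lemma prepare_md_titles_eq_foldA (data : String) :
    prepare_md_titles data
      = ((PySem.Str.split? data "\n").getD []).foldl pvStepA (none, none) := rfl

-- A's fold from an arbitrary start state: each component is "last match, else the start value".
lemma foldA_state (L : List String) (t d : Option String) :
    L.foldl pvStepA (t, d)
      = ((L.foldl pvStepA (none, none)).1.or t, (L.foldl pvStepA (none, none)).2.or d) := by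
  induction L generalizing t d with
  | nil => simp
  | cons x L ih =>
    simp only [List.foldl_cons]
    by_cases h1 : PySem.Str.startswith x "# title" = true
    · rw [show pvStepA (t, d) x = (some (PySem.Str.replace x "# title " ""), d) by
            simp only [pvStepA]; rw [if_pos h1],
          show pvStepA (none, none) x = (some (PySem.Str.replace x "# title " ""), none) by
            simp only [pvStepA]; rw [if_pos h1],
          ih (some (PySem.Str.replace x "# title " "")) d,
          ih (some (PySem.Str.replace x "# title " "")) none]
      simp
    · by_cases h2 : PySem.Str.startswith x "# description" = true
      · rw [show pvStepA (t, d) x = (t, some (PySem.Str.replace x "# description " "")) by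
              simp only [pvStepA]; rw [if_neg h1, if_pos h2],
            show pvStepA (none, none) x = (none, some (PySem.Str.replace x "# description " "")) by
              simp only [pvStepA]; rw [if_neg h1, if_pos h2],
            ih t (some (PySem.Str.replace x "# description " "")),
            ih none (some (PySem.Str.replace x "# description " ""))]
        simp
      · rw [show pvStepA (t, d) x = (t, d) by
              simp only [pvStepA]; rw [if_neg h1, if_neg h2],
            show pvStepA (none, none) x = ((none : Option String), (none : Option String)) by
              simp only [pvStepA]; rw [if_neg h1, if_neg h2],
            ih t d]

-- B's reverse scan computes A's forward fold.
lemma scanRev_eq_foldA (L : List String) :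
    pvScanRev L.reverse none none = L.foldl pvStepA (none, none) := by
  induction L with
  | nil => rfl
  | cons x L ih =>
    rw [List.reverse_cons, pvScanRev_append, ih, List.foldl_cons]
    by_cases h1 : PySem.Str.startswith x "# title" = true
    · have h1c : PySem.Chars.startswith x.toList ['#', ' ', 't', 'i', 't', 'l', 'e'] = true := by
        simpa using h1
      have h2c : PySem.Chars.startswith x.toList
          ['#', ' ', 'd', 'e', 's', 'c', 'r', 'i', 'p', 't', 'i', 'o', 'n'] = false := by
        simpa using not_title_and_desc x h1
      rw [show pvStepA (none, none) x = (some (PySem.Str.replace x "# title " ""), none) by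
            simp only [pvStepA]; rw [if_pos h1],
          foldA_state L (some (PySem.Str.replace x "# title " "")) none]
      cases hF : (L.foldl pvStepA (none, none)).1 <;>
        cases hG : (L.foldl pvStepA (none, none)).2 <;>
          simp [pvScanRev, h1c, h2c, hF, hG]
    · have h1c : PySem.Chars.startswith x.toList ['#', ' ', 't', 'i', 't', 'l', 'e'] = false := by
        simpa using h1
      by_cases h2 : PySem.Str.startswith x "# description" = true
      · have h2c : PySem.Chars.startswith x.toList
            ['#', ' ', 'd', 'e', 's', 'c', 'r', 'i', 'p', 't', 'i', 'o', 'n'] = true := by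
          simpa using h2
        rw [show pvStepA (none, none) x = (none, some (PySem.Str.replace x "# description " "")) by
              simp only [pvStepA]; rw [if_neg h1, if_pos h2],
            foldA_state L none (some (PySem.Str.replace x "# description " ""))]
        cases hF : (L.foldl pvStepA (none, none)).1 <;>
          cases hG : (L.foldl pvStepA (none, none)).2 <;>
            simp [pvScanRev, h1c, h2c, hF, hG]
      · have h2c : PySem.Chars.startswith x.toList
            ['#', ' ', 'd', 'e', 's', 'c', 'r', 'i', 'p', 't', 'i', 'o', 'n'] = false := by
          simpa using h2
        rw [show pvStepA (none, none) x = ((none : Option String), (none : Option String)) by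
              simp only [pvStepA]; rw [if_neg h1, if_neg h2], foldA_state L none none]
        cases hF : (L.foldl pvStepA (none, none)).1 <;>
          cases hG : (L.foldl pvStepA (none, none)).2 <;>
            simp [pvScanRev, h1c, h2c, hF, hG]

-- ===== VERDICT (by name: the statement is the Claim_ definition above) =====
theorem prepare_md_titles_spec : Claim_equal_prepare_md_titles := by
  intro data _
  unfold Spec_prepare_md_titles prepare_md_titles_alt
  rw [prepare_md_titles_eq_foldA, scanRev_eq_foldA]
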